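-- pv_equiv track=rewrite | github.com/zamkrokes/carpooling | data_generation_and_preprocess.py | get_possible_passengers_for_each_driver
-- ===== SOURCE A (Python) =====
-- def get_all_possible_drivers(possible_drivers_for_passenger):
--     possible_drivers_list = [driver for drivers_list in possible_drivers_for_passenger.values() for driver in drivers_list]
--     return possible_drivers_list
--
-- def get_possible_passengers_for_each_driver(possible_drivers_for_passenger):
--     possible_drivers_list = get_all_possible_drivers(possible_drivers_for_passenger)
--     possible_passengers_for_driver = {}
--     for driver in possible_drivers_list:
--         possible_passengers_for_driver[driver] = []
--         for key, value in possible_drivers_for_passenger.items():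
--             if driver in value:
--                 possible_passengers_for_driver[driver].append(key)
--     return possible_passengers_for_driver
-- ===== SOURCE B (Python) =====
-- def get_possible_passengers_for_each_driver(possible_drivers_for_passenger):
--     possible_passengers_for_driver = {}
--     for key, drivers_list in possible_drivers_for_passenger.items():
--         for driver in dict.fromkeys(drivers_list):
--             possible_passengers_for_driver.setdefault(driver, []).append(key)
--     return possible_passengers_for_driver
-- ===== Notes on version B (the rewrite author's own statement) =====
-- stated objective: faster
-- what changed: A flattens all driver lists and, for every occurrence of every driver, rescans the whole dict to rebuild that driver's passenger list; B makes a single pass over the items, appending each passenger key once to the list of each distinct driver it names.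
import Mathlib
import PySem

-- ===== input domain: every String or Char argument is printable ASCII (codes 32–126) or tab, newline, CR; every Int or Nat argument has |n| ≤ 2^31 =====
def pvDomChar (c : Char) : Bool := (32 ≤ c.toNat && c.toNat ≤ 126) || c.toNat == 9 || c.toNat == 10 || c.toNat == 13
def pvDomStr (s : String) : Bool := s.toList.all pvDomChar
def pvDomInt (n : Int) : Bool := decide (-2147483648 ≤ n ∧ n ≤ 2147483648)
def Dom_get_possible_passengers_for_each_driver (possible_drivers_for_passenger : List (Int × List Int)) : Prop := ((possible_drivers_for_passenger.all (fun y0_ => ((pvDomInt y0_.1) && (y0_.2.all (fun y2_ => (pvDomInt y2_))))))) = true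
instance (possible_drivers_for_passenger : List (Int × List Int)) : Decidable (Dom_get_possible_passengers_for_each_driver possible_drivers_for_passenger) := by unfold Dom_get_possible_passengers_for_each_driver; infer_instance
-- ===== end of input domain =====

-- B replaces A's rescan of the whole dict for every flattened driver occurrence by one pass over the
-- items that appends each passenger key to its drivers' lists directly (objective: faster, asymptotic).
-- The dict parameter is modelled as PySem.Dict.ofList of the association list (Python dict construction).

-- ===== PORT A =====
def get_all_possible_drivers (d0 : PySem.Dict Int (List Int)) : List Int :=
  (PySem.Dict.values d0).foldl (fun acc drivers_list => acc ++ drivers_list) []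

def get_possible_passengers_for_each_driver (possible_drivers_for_passenger : List (Int × List Int)) : List (Int × List Int) :=
  let d0 : PySem.Dict Int (List Int) := PySem.Dict.ofList possible_drivers_for_passenger
  let possible_drivers_list := get_all_possible_drivers d0
  (possible_drivers_list.foldl (fun acc driver =>
      (PySem.Dict.items d0).foldl
        (fun a kv => if kv.2.contains driver then PySem.Dict.modify a driver [] (fun v => v ++ [kv.1]) else a)
        (PySem.Dict.insert acc driver []))
    PySem.Dict.empty).items

-- ===== PORT B =====
def get_possible_passengers_for_each_driver_alt (possible_drivers_for_passenger : List (Int × List Int)) : List (Int × List Int) :=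
  let d0 : PySem.Dict Int (List Int) := PySem.Dict.ofList possible_drivers_for_passenger
  ((PySem.Dict.items d0).foldl (fun acc kv =>
      (PySem.List.dedup kv.2).foldl
        (fun a driver => PySem.Dict.modify a driver [] (fun v => v ++ [kv.1]))
        acc)
    PySem.Dict.empty).items

-- ===== PRECONDITION & SPEC =====
def Spec_get_possible_passengers_for_each_driver (possible_drivers_for_passenger : List (Int × List Int)) (out : List (Int × List Int)) : Prop := out = get_possible_passengers_for_each_driver_alt possible_drivers_for_passenger
instance (possible_drivers_for_passenger : List (Int × List Int)) (out : List (Int × List Int)) : Decidable (Spec_get_possible_passengers_for_each_driver possible_drivers_for_passenger out) := by unfold Spec_get_possible_passengers_for_each_driver; infer_instance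

-- ===== CLAIM (what is proved, stated in full; the proofs are below) =====
def Claim_equal_get_possible_passengers_for_each_driver : Prop := ∀ (possible_drivers_for_passenger : List (Int × List Int)), Dom_get_possible_passengers_for_each_driver possible_drivers_for_passenger → Spec_get_possible_passengers_for_each_driver possible_drivers_for_passenger (get_possible_passengers_for_each_driver possible_drivers_for_passenger)

-- ===== LEMMAS AND PROOFS =====

/-- passengers whose driver list contains `c`, in item order: the value both programs store at key `c`. -/
def pvP (l : List (Int × List Int)) (c : Int) : List Int :=
  (l.filter (fun kv => kv.2.contains c)).map Prod.fst

lemma pvP_cons (kv : Int × List Int) (rest : List (Int × List Int)) (c : Int) :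
    pvP (kv :: rest) c = (if c ∈ kv.2 then [kv.1] else []) ++ pvP rest c := by
  by_cases h : c ∈ kv.2 <;> simp [pvP, h]

lemma innerA_getD (l : List (Int × List Int)) (drv c : Int) :
    ∀ acc : PySem.Dict Int (List Int),
    (l.foldl (fun a kv => if kv.2.contains drv then PySem.Dict.modify a drv [] (fun v => v ++ [kv.1]) else a) acc).getD c []
      = if c = drv then acc.getD drv [] ++ pvP l drv else acc.getD c [] := by
  induction l with
  | nil => intro acc; by_cases h : c = drv <;> simp [pvP, h]
  | cons kv rest ih =>
    intro acc
    by_cases h : drv ∈ kv.2 <;> by_cases hc : c = drv <;>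
      simp_all [List.foldl_cons, pvP_cons, PySem.Dict.getD_modify, List.append_assoc]

lemma innerA_keys (l : List (Int × List Int)) (drv : Int) :
    ∀ acc : PySem.Dict Int (List Int), drv ∈ acc.keys →
    (l.foldl (fun a kv => if kv.2.contains drv then PySem.Dict.modify a drv [] (fun v => v ++ [kv.1]) else a) acc).keys
      = acc.keys := by
  induction l with
  | nil => intro acc _; rfl
  | cons kv rest ih =>
    intro acc hmem
    by_cases h : kv.2.contains drv
    · have hct : acc.contains drv = true := by
        rw [PySem.Dict.contains_eq_decide_mem_keys]; simpa using hmem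
      have hk : (PySem.Dict.modify acc drv [] (fun v => v ++ [kv.1])).keys = acc.keys := by
        rw [PySem.Dict.keys_modify, PySem.Dict.keys_insert_of_contains _ _ hct]
      simp only [List.foldl_cons, h, if_true]
      rw [ih _ (by rw [hk]; exact hmem), hk]
    · simp only [List.foldl_cons, h]
      exact ih acc hmem

/-- one outer iteration of A: it sets the entry at `drv` to `pvP l drv` and leaves all others alone. -/
lemma stepA_getD (l : List (Int × List Int)) (drv c : Int) (acc : PySem.Dict Int (List Int)) :
    ((l.foldl (fun a kv => if kv.2.contains drv then PySem.Dict.modify a drv [] (fun v => v ++ [kv.1]) else a)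
        (PySem.Dict.insert acc drv [])).getD c [])
      = if c = drv then pvP l drv else acc.getD c [] := by
  rw [innerA_getD]
  by_cases hc : c = drv <;> simp [hc, PySem.Dict.getD_insert]

lemma stepA_keys (l : List (Int × List Int)) (drv : Int) (acc : PySem.Dict Int (List Int)) :
    ((l.foldl (fun a kv => if kv.2.contains drv then PySem.Dict.modify a drv [] (fun v => v ++ [kv.1]) else a)
        (PySem.Dict.insert acc drv [])).keys)
      = PySem.Set.add acc.keys drv := by
  rw [innerA_keys _ _ _ (by simp [PySem.Dict.mem_keys_insert])]
  by_cases h : drv ∈ acc.keys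
  · rw [PySem.Dict.keys_insert_of_contains _ _
      (by rw [PySem.Dict.contains_eq_decide_mem_keys]; simpa using h)]
    rw [PySem.Set.add_of_mem h]
  · rw [PySem.Dict.keys_insert_of_not_contains _ _
      (by rw [PySem.Dict.contains_eq_decide_mem_keys]; simpa using h)]
    rw [PySem.Set.add_of_not_mem h]

lemma outerA_keys (l : List (Int × List Int)) (L : List Int) :
    ∀ acc : PySem.Dict Int (List Int),
    ((L.foldl (fun acc drv =>
        l.foldl (fun a kv => if kv.2.contains drv then PySem.Dict.modify a drv [] (fun v => v ++ [kv.1]) else a)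
          (PySem.Dict.insert acc drv [])) acc).keys)
      = PySem.Set.update acc.keys L := by
  induction L with
  | nil => intro acc; rfl
  | cons d rest ih =>
    intro acc
    rw [List.foldl_cons, ih, PySem.Set.update_cons]
    congr 1
    exact stepA_keys l d acc

lemma outerA_getD (l : List (Int × List Int)) (L : List Int) (c : Int) :
    ∀ acc : PySem.Dict Int (List Int),
    ((L.foldl (fun acc drv =>
        l.foldl (fun a kv => if kv.2.contains drv then PySem.Dict.modify a drv [] (fun v => v ++ [kv.1]) else a)
          (PySem.Dict.insert acc drv [])) acc).getD c [])
      = if c ∈ L then pvP l c else acc.getD c [] := by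
  induction L with
  | nil => intro acc; simp
  | cons d rest ih =>
    intro acc
    rw [List.foldl_cons, ih, stepA_getD]
    by_cases hr : c ∈ rest <;> by_cases hd : c = d <;> simp [hr, hd]

lemma innerB_getD (k c : Int) (ds : List Int) :
    ∀ acc : PySem.Dict Int (List Int), ds.Nodup →
    ((ds.foldl (fun a driver => PySem.Dict.modify a driver [] (fun v => v ++ [k])) acc).getD c [])
      = acc.getD c [] ++ (if c ∈ ds then [k] else []) := by
  induction ds with
  | nil => intro acc _; simp
  | cons d rest ih =>
    intro acc hnd
    obtain ⟨hdr, hrest⟩ := List.nodup_cons.mp hnd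
    rw [List.foldl_cons, ih _ hrest]
    by_cases hd : c = d
    · subst hd; simp [hdr]
    · by_cases hr : c ∈ rest <;> simp [hd, hr, PySem.Dict.getD_modify]

lemma innerB_keys (k : Int) (ds : List Int) (acc : PySem.Dict Int (List Int)) :
    ((ds.foldl (fun a driver => PySem.Dict.modify a driver [] (fun v => v ++ [k])) acc).keys)
      = PySem.Set.update acc.keys ds := by
  have h := PySem.Dict.keys_foldl_modify_key ds (fun x => x) [] (fun _ _ v => v ++ [k]) acc
  simpa using h

lemma update_dedup {s : PySem.Set Int} {xs : List Int} :
    PySem.Set.update s (PySem.List.dedup xs) = PySem.Set.update s xs := by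
  rw [PySem.List.dedup_eq_ofList, PySem.Set.update_eq_append_filter,
    PySem.Set.update_eq_append_filter, PySem.Set.ofList_ofList]

lemma outerB_keys (items : List (Int × List Int)) :
    ∀ acc : PySem.Dict Int (List Int),
    ((items.foldl (fun acc kv =>
        (PySem.List.dedup kv.2).foldl (fun a driver => PySem.Dict.modify a driver [] (fun v => v ++ [kv.1])) acc)
      acc).keys)
      = items.foldl (fun s kv => PySem.Set.update s kv.2) acc.keys := by
  induction items with
  | nil => intro acc; rfl
  | cons kv rest ih =>
    intro acc
    rw [List.foldl_cons, ih, List.foldl_cons, innerB_keys, update_dedup]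

lemma outerB_getD (items : List (Int × List Int)) (c : Int) :
    ∀ acc : PySem.Dict Int (List Int),
    ((items.foldl (fun acc kv =>
        (PySem.List.dedup kv.2).foldl (fun a driver => PySem.Dict.modify a driver [] (fun v => v ++ [kv.1])) acc)
      acc).getD c [])
      = acc.getD c [] ++ pvP items c := by
  induction items with
  | nil => intro acc; simp [pvP]
  | cons kv rest ih =>
    intro acc
    rw [List.foldl_cons, ih, pvP_cons]
    have hnd : (PySem.List.dedup kv.2).Nodup := by
      rw [PySem.List.dedup_eq_ofList]; exact PySem.Set.nodup_ofList _
    rw [innerB_getD _ _ _ _ hnd]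
    have hmem : (c ∈ PySem.List.dedup kv.2) ↔ c ∈ kv.2 := by
      rw [PySem.List.dedup_eq_ofList, PySem.Set.mem_ofList]
    by_cases h : c ∈ kv.2 <;> simp [h]

/-- the flattened driver list and the per-item key folds build the same key set. -/
lemma keys_common (items : List (Int × List Int)) :
    ∀ s : PySem.Set Int,
    items.foldl (fun s kv => PySem.Set.update s kv.2) s
      = PySem.Set.update s (items.flatMap (fun kv => kv.2)) := by
  induction items with
  | nil => intro s; rfl
  | cons kv rest ih =>
    intro s
    rw [List.foldl_cons, ih, List.flatMap_cons, PySem.Set.update_append]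

-- ===== VERDICT (by name: the statement is the Claim_ definition above) =====
theorem get_possible_passengers_for_each_driver_spec : Claim_equal_get_possible_passengers_for_each_driver := by
  intro inp _hDom
  unfold Spec_get_possible_passengers_for_each_driver
  unfold get_possible_passengers_for_each_driver get_possible_passengers_for_each_driver_alt
  simp only []
  set d0 : PySem.Dict Int (List Int) := PySem.Dict.ofList inp with hd0
  set items := PySem.Dict.items d0 with hitems
  -- A's flattened driver list
  have hL : get_all_possible_drivers d0 = items.flatMap (fun kv => kv.2) := by
    unfold get_all_possible_drivers
    rw [show PySem.Dict.values d0 = items.map Prod.snd from rfl]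
    rw [PySem.List.foldl_append_eq_flatMap (fun dl => dl) (items.map Prod.snd) []]
    simp [List.flatMap_map]
  set L := items.flatMap (fun kv => kv.2) with hLdef
  -- keys of both result dicts
  have hKA : ((get_all_possible_drivers d0).foldl (fun acc drv =>
      items.foldl (fun a kv => if kv.2.contains drv then PySem.Dict.modify a drv [] (fun v => v ++ [kv.1]) else a)
        (PySem.Dict.insert acc drv [])) PySem.Dict.empty).keys = PySem.Set.ofList L := by
    rw [hL, outerA_keys, PySem.Dict.keys_empty, PySem.Set.update_nil_left]
  have hKB : ((items.foldl (fun acc kv =>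
      (PySem.List.dedup kv.2).foldl (fun a driver => PySem.Dict.modify a driver [] (fun v => v ++ [kv.1])) acc)
      PySem.Dict.empty).keys) = PySem.Set.ofList L := by
    rw [outerB_keys, PySem.Dict.keys_empty, keys_common, PySem.Set.update_nil_left]
  -- items via keys + getD
  rw [PySem.Dict.items_eq_map_keys _ (by rw [hKA]; exact PySem.Set.nodup_ofList _) [],
      PySem.Dict.items_eq_map_keys _ (by rw [hKB]; exact PySem.Set.nodup_ofList _) [],
      hKA, hKB]
  apply List.map_congr_left
  intro c hc
  have hcL : c ∈ L := (PySem.Set.mem_ofList _ _).mp hc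
  rw [hL, outerA_getD, outerB_getD]
  simp [hcL, PySem.Dict.getD_empty]
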